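-- pv_equiv track=rewrite | github.com/MrBrantCode/unitest_baseline | mut_generate/mist_train_cf/cf_50898/solution.py | sort_strings
-- ===== SOURCE A (Python) =====
-- VOWELS = ('a', 'e', 'i', 'o', 'u')
--
-- def count_vowels(string):
--     return sum(1 for char in string if char.lower() in VOWELS)
--
-- def sort_strings(arr):
--     for i in range(len(arr)):
--         for j in range(len(arr) - i - 1):
--             vowel_count_first_string = count_vowels(arr[j])
--             vowel_count_second_string = count_vowels(arr[j + 1])
--             if (vowel_count_first_string > vowel_count_second_string) or (
--                vowel_count_first_string == vowel_count_second_string and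
--                len(arr[j]) > len(arr[j + 1])) or (
--                vowel_count_first_string == vowel_count_second_string and
--                len(arr[j]) == len(arr[j + 1]) and
--                arr[j].lower() > arr[j + 1].lower()
--             ):
--                 arr[j], arr[j + 1] = arr[j + 1], arr[j]
--     return arr
-- ===== SOURCE B (Python) =====
-- def sort_strings(arr):
--     arr.sort(key=lambda s: s.lower())
--     arr.sort(key=len)
--     arr.sort(key=lambda s: sum(c.lower() in 'aeiou' for c in s))
--     return arr
-- ===== Notes on version B (the rewrite author's own statement) =====
-- stated objective: faster
-- what changed: Replaces the hand-written O(n^2) bubble sort (recomputing vowel counts on every comparison) with three passes of Python's built-in stable sort, by least-significant key first: lowercased string, then length, then vowel count.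
import Mathlib
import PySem

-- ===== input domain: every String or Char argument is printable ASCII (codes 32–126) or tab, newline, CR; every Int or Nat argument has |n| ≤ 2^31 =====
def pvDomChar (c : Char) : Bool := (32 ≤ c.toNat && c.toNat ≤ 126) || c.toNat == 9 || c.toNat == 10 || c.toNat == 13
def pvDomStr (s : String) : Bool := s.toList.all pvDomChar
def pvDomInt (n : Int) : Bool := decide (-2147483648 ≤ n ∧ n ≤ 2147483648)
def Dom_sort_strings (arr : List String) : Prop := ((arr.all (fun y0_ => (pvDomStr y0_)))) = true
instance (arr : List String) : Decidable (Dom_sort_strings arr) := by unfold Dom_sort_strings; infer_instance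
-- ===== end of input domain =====

-- B replaces A's hand-written bubble sort by three passes of the built-in stable sort,
-- least-significant key first (lowercased string, then length, then vowel count); A mutates
-- arr in place and B performs the same in-place sorts, the equivalence proved is about the return value.

-- ===== PORT A =====
def count_vowels (string : String) : Int :=
  string.toList.foldl
    (fun acc c => if PySem.Chars.lowerChar c ∈ ['a', 'e', 'i', 'o', 'u'] then acc + 1 else acc) 0

-- A's swap condition on the adjacent pair (x, y) = (arr[j], arr[j+1]), transliterated
def pvSwapCond (x y : String) : Bool :=
  let vowel_count_first_string := count_vowels x
  let vowel_count_second_string := count_vowels y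
  decide (vowel_count_first_string > vowel_count_second_string) ||
  (decide (vowel_count_first_string = vowel_count_second_string) &&
   decide (PySem.Str.len x > PySem.Str.len y)) ||
  (decide (vowel_count_first_string = vowel_count_second_string) &&
   decide (PySem.Str.len x = PySem.Str.len y) &&
   decide (PySem.Str.lower x > PySem.Str.lower y))

-- the body of the inner loop: compare arr[j] with arr[j+1] and swap (indices are always in
-- range in A; the `match` is only a totality guard)
def pvInnerStep (a : List String) (j : Int) : List String :=
  match PySem.List.pyGet? a j, PySem.List.pyGet? a (j + 1) with
  | some x, some y =>
      if pvSwapCond x y then (a.set j.toNat y).set (j.toNat + 1) x else a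
  | _, _ => a

def sort_strings (arr : List String) : List String :=
  (PySem.List.pyRange 0 (PySem.List.len arr)).foldl
    (fun a i => (PySem.List.pyRange 0 (PySem.List.len a - i - 1)).foldl pvInnerStep a)
    arr

-- ===== PORT B =====
-- sum(c.lower() in 'aeiou' for c in s), the key of the last pass
def pvVowels (s : String) : Int :=
  s.toList.foldl
    (fun acc c => acc + (if PySem.Chars.lowerChar c ∈ ['a', 'e', 'i', 'o', 'u'] then 1 else 0)) 0

-- three stable sorts, least-significant key first: s.lower(), then len(s), then the vowel count
def sort_strings_alt (arr : List String) : List String :=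
  PySem.List.sorted
    (PySem.List.sorted (PySem.List.sorted arr (fun s => PySem.Str.lower s)) (fun s => PySem.Str.len s))
    pvVowels

-- ===== PRECONDITION & SPEC =====
def Spec_sort_strings (arr : List String) (out : List String) : Prop := out = sort_strings_alt arr
instance (arr : List String) (out : List String) : Decidable (Spec_sort_strings arr out) := by unfold Spec_sort_strings; infer_instance

-- ===== CLAIM (what is proved, stated in full; the proofs are below) =====
def Claim_equal_sort_strings : Prop := ∀ (arr : List String), Dom_sort_strings arr → Spec_sort_strings arr (sort_strings arr)

-- ===== LEMMAS AND PROOFS =====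

-- the full comparison key of both programs, as one lexicographic triple (proofs only)
def pvKey (s : String) : Lex (Int × Lex (Int × String)) :=
  toLex (pvVowels s, toLex (PySem.Str.len s, PySem.Str.lower s))

-- the two vowel counters agree
theorem pvVowels_eq (s : String) : count_vowels s = pvVowels s := by
  unfold count_vowels pvVowels
  generalize s.toList = l
  suffices h : ∀ (a : Int),
      l.foldl (fun acc c => if PySem.Chars.lowerChar c ∈ ['a','e','i','o','u'] then acc + 1 else acc) a
      = l.foldl (fun acc c => acc + (if PySem.Chars.lowerChar c ∈ ['a','e','i','o','u'] then 1 else 0)) a by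
    exact h 0
  induction l with
  | nil => intro a; rfl
  | cons c t ih =>
      intro a
      simp only [List.foldl]
      by_cases h : PySem.Chars.lowerChar c ∈ ['a','e','i','o','u']
      · simp only [if_pos h]; exact ih (a + 1)
      · simp only [if_neg h, add_zero]; exact ih a

-- A's swap condition is exactly "strictly greater key"
theorem pvSwapCond_iff (x y : String) : pvSwapCond x y = decide (pvKey y < pvKey x) := by
  unfold pvSwapCond pvKey
  rw [pvVowels_eq x, pvVowels_eq y]
  by_cases h1 : pvVowels y < pvVowels x <;>
  by_cases h2 : pvVowels x = pvVowels y <;>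
  by_cases h3 : PySem.Str.len y < PySem.Str.len x <;>
  by_cases h4 : PySem.Str.len x = PySem.Str.len y <;>
  by_cases h5 : PySem.Str.lower y < PySem.Str.lower x <;>
    simp_all [Prod.Lex.toLex_lt_toLex, gt_iff_lt, eq_comm]

-- the bubble cascade: one inner loop (j = 0 .. fuel-1) as a structural recursion
def pvGo : Nat → List String → List String
  | _, [] => []
  | 0, l => l
  | _ + 1, [x] => [x]
  | m + 1, x :: y :: t =>
      if pvSwapCond x y then y :: pvGo m (x :: t) else x :: pvGo m (y :: t)

theorem pvGo_length : ∀ (m : Nat) (l : List String), (pvGo m l).length = l.length := by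
  intro m
  induction m with
  | zero => intro l; cases l <;> rfl
  | succ m ih =>
      intro l
      match l with
      | [] => rfl
      | [x] => rfl
      | x :: y :: t =>
          simp only [pvGo]
          split <;> simp [ih]

theorem pvGo_append : ∀ (m : Nat) (p s : List String), m + 1 ≤ p.length →
    pvGo m (p ++ s) = pvGo m p ++ s := by
  intro m
  induction m with
  | zero =>
      intro p s h
      match p with
      | x :: t => cases t <;> cases s <;> rfl
  | succ m ih =>
      intro p s h
      match p with
      | x :: y :: t =>
          simp only [List.cons_append, pvGo]
          split <;> rw [← List.cons_append, ih] <;> simp_all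

-- filter by key: the stability witness
def pvF (k : Lex (Int × Lex (Int × String))) (l : List String) : List String :=
  l.filter (fun s => decide (pvKey s = k))

theorem pvF_append (k : _) (l₁ l₂ : List String) : pvF k (l₁ ++ l₂) = pvF k l₁ ++ pvF k l₂ := by
  simp [pvF]

-- one full pass on a nonempty list: it ends with a maximal element and is key-stable
theorem pvPass_spec : ∀ (t : List String) (x : String),
    ∃ q b, pvGo ((x :: t).length - 1) (x :: t) = q ++ [b] ∧
      (∀ z ∈ q, pvKey z ≤ pvKey b) ∧
      (∀ k, pvF k (q ++ [b]) = pvF k (x :: t)) := by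
  intro t
  induction t with
  | nil =>
      intro x
      exact ⟨[], x, rfl, by simp, fun k => rfl⟩
  | cons y t ih =>
      intro x
      simp only [List.length_cons, Nat.add_sub_cancel, pvGo]
      by_cases hc : pvSwapCond x y = true
      · obtain ⟨q, b, hgo, hle, hst⟩ := ih x
        simp only [List.length_cons, Nat.add_sub_cancel] at hgo
        refine ⟨y :: q, b, by simp [hc, hgo], ?_, ?_⟩
        · intro z hz
          have hxb : pvKey x ≤ pvKey b := by
            have hx : x ∈ q ++ [b] := by
              have : x ∈ pvF (pvKey x) (q ++ [b]) := by
                rw [hst]; simp [pvF]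
              exact List.mem_of_mem_filter this
            rcases List.mem_append.1 hx with h | h
            · exact hle x h
            · simp at h; simp [h]
          rcases hz with _ | hz
          · -- z = y
            have : pvKey y < pvKey x := by
              have := pvSwapCond_iff x y; rw [hc] at this
              exact of_decide_eq_true this.symm
            exact le_trans (le_of_lt this) hxb
          · exact hle z (by assumption)
        · intro k
          have hkxy : ¬ (pvKey x = k ∧ pvKey y = k) := by
            rintro ⟨h1, h2⟩
            have : pvKey y < pvKey x := by
              have := pvSwapCond_iff x y; rw [hc] at this
              exact of_decide_eq_true this.symm
            rw [h1, h2] at this; exact lt_irrefl _ this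
          have := hst k
          by_cases hy : pvKey y = k <;> by_cases hx : pvKey x = k <;>
            simp_all [pvF, List.filter]
      · obtain ⟨q, b, hgo, hle, hst⟩ := ih y
        simp only [List.length_cons, Nat.add_sub_cancel] at hgo
        refine ⟨x :: q, b, by simp [hc, hgo], ?_, ?_⟩
        · intro z hz
          have hyb : pvKey y ≤ pvKey b := by
            have hy : y ∈ q ++ [b] := by
              have : y ∈ pvF (pvKey y) (q ++ [b]) := by
                rw [hst]; simp [pvF]
              exact List.mem_of_mem_filter this
            rcases List.mem_append.1 hy with h | h
            · exact hle y h
            · simp at h; simp [h]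
          rcases hz with _ | hz
          · -- z = x
            have : ¬ (pvKey y < pvKey x) := by
              have := pvSwapCond_iff x y
              rw [Bool.not_eq_true] at hc; rw [hc] at this
              simpa using of_decide_eq_false this.symm
            exact le_trans (le_of_not_gt this) hyb
          · exact hle z (by assumption)
        · intro k
          have := hst k
          by_cases hx : pvKey x = k <;> simp_all [pvF, List.filter]

theorem pvTakeApp (u : List String) (a : String) (s : List String) :
    (u ++ a :: s).take (u.length + 1) = u ++ [a] := by
  induction u with
  | nil => simp
  | cons c w ih => simp [List.take_succ_cons, ih]

theorem pvDropApp (u : List String) (a : String) (s : List String) :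
    (u ++ a :: s).drop (u.length + 1) = s := by
  induction u with
  | nil => simp
  | cons c w ih => simpa using ih

theorem pvSetSwap (u : List String) (x y : String) (t : List String) :
    ((u ++ x :: y :: t).set u.length y).set (u.length + 1) x = u ++ y :: x :: t := by
  induction u with
  | nil => rfl
  | cons c w ih => simpa using ih

-- the inner index loop equals the structural cascade
theorem pvBridge : ∀ (m j0 : Nat) (l : List String),
    (PySem.List.pyRange (j0 : Int) ((j0 : Int) + m)).foldl pvInnerStep l
      = l.take j0 ++ pvGo m (l.drop j0) := by
  intro m
  induction m with
  | zero =>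
      intro j0 l
      have h0 : ((j0 : Int) + ((0 : Nat) : Int)) = (j0 : Int) := by push_cast; ring
      rw [h0]
      have hr : PySem.List.pyRange (j0 : Int) (j0 : Int) = [] := by
        simp [PySem.List.pyRange]
      rw [hr]
      have hg : pvGo 0 (l.drop j0) = l.drop j0 := by cases h : l.drop j0 <;> rfl
      simp [hg]
  | succ m ih =>
      intro j0 l
      have hlt : (j0 : Int) < (j0 : Int) + (m + 1 : Nat) := by push_cast; omega
      rw [PySem.List.pyRange_one_cons hlt]
      simp only [List.foldl_cons]
      have hstep : ((j0 : Int) + 1) = ((j0 + 1 : Nat) : Int) := by push_cast; ring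
      have harg : ((j0 : Int) + ((m + 1 : Nat) : Int)) = (((j0 + 1 : Nat)) : Int) + (m : Int) := by
        push_cast; ring
      rw [harg, hstep, ih (j0 + 1) (pvInnerStep l (j0 : Int))]
      have hgnil : pvGo m ([] : List String) = [] := by cases m <;> rfl
      rcases hd : l.drop j0 with _ | ⟨x, t⟩
      · -- index out of range: no element at j0
        have hlen : l.length ≤ j0 := by
          have := congrArg List.length hd; simp at this; omega
        have hget : PySem.List.pyGet? l (j0 : Int) = none := by
          rw [PySem.List.pyGet?_natCast]; exact List.getElem?_eq_none hlen
        have hid : pvInnerStep l (j0 : Int) = l := by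
          unfold pvInnerStep; rw [hget]
        rw [hid]
        have h1 : l.drop (j0 + 1) = [] := List.drop_eq_nil_of_le (by omega)
        have h2 : l.take (j0 + 1) = l := List.take_of_length_le (by omega)
        have h3 : l.take j0 = l := List.take_of_length_le hlen
        rw [h1, h2, h3, hgnil]
        simp [pvGo]
      · have hj0 : j0 < l.length := by
          have := congrArg List.length hd; simp at this; omega
        have hx : l[j0]? = some x := by
          have h := congrArg (fun z => z[0]?) hd
          simpa [List.getElem?_drop] using h
        have hl : l = l.take j0 ++ x :: t := by
          conv_lhs => rw [← List.take_append_drop j0 l]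
          rw [hd]
        have hlentake : (l.take j0).length = j0 := by
          simp [List.length_take]; omega
        rcases ht : t with _ | ⟨y, t'⟩
        · -- only one element from j0 on
          subst ht
          have hlen : l.length = j0 + 1 := by
            have := congrArg List.length hd; simp at this; omega
          have hget2 : PySem.List.pyGet? l ((j0 : Int) + 1) = none := by
            rw [hstep, PySem.List.pyGet?_natCast]; exact List.getElem?_eq_none (by omega)
          have hid : pvInnerStep l (j0 : Int) = l := by
            unfold pvInnerStep
            rw [hget2]
            rcases PySem.List.pyGet? l (j0 : Int) with _ | _ <;> rfl
          rw [hid]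
          have h1 : l.drop (j0 + 1) = [] := List.drop_eq_nil_of_le (by omega)
          have h2 : l.take (j0 + 1) = l := List.take_of_length_le (by omega)
          have hgo1 : pvGo (m + 1) [x] = [x] := by simp [pvGo]
          rw [h1, h2, hgo1, hgnil, List.append_nil]
          conv_lhs => rw [hl]
        · -- two elements available: the genuine compare-swap step
          subst ht
          have hj1 : j0 + 1 < l.length := by
            have := congrArg List.length hd; simp at this; omega
          have hy : l[j0 + 1]? = some y := by
            have h := congrArg (fun z => z[1]?) hd
            simpa [List.getElem?_drop] using h
          have hget1 : PySem.List.pyGet? l (j0 : Int) = some x := by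
            rw [PySem.List.pyGet?_natCast]; exact hx
          have hget2 : PySem.List.pyGet? l ((j0 : Int) + 1) = some y := by
            rw [hstep, PySem.List.pyGet?_natCast]; exact hy
          unfold pvInnerStep
          rw [hget1, hget2]
          simp only [Int.toNat_natCast]
          by_cases hc : pvSwapCond x y = true
          · simp only [hc, if_true]
            have hset : (l.set j0 y).set (j0 + 1) x = l.take j0 ++ y :: x :: t' := by
              have h := pvSetSwap (l.take j0) x y t'
              rw [hlentake] at h
              conv_lhs => rw [hl]
              exact h
            rw [hset]
            have h1 := pvTakeApp (l.take j0) y (x :: t')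
            have h2 := pvDropApp (l.take j0) y (x :: t')
            rw [hlentake] at h1 h2
            rw [h1, h2]
            have hgo : pvGo (m + 1) (x :: y :: t') = y :: pvGo m (x :: t') := by
              simp [pvGo, hc]
            rw [hgo, List.append_assoc, List.singleton_append]
          · simp only [hc, if_false, Bool.false_eq_true]
            have h1 : l.take (j0 + 1) = l.take j0 ++ [x] := by
              conv_lhs => rw [hl]
              have := pvTakeApp (l.take j0) x (y :: t')
              rw [hlentake] at this; exact this
            have h2 : l.drop (j0 + 1) = y :: t' := by
              conv_lhs => rw [hl]
              have := pvDropApp (l.take j0) x (y :: t')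
              rw [hlentake] at this; exact this
            rw [h1, h2]
            have hgo : pvGo (m + 1) (x :: y :: t') = x :: pvGo m (y :: t') := by
              simp [pvGo, hc]
            rw [hgo, List.append_assoc, List.singleton_append]

-- uniqueness of a key-ordered, key-stable rearrangement
theorem pvMem_of_filter (l₁ l₂ : List String) (h : ∀ k, pvF k l₁ = pvF k l₂) :
    ∀ x ∈ l₁, x ∈ l₂ := by
  intro x hx
  have hm : x ∈ pvF (pvKey x) l₁ := by simp [pvF, hx]
  rw [h] at hm
  exact List.mem_of_mem_filter hm

theorem pvUniq : ∀ (ys zs : List String),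
    ys.Pairwise (fun a b => pvKey a ≤ pvKey b) → zs.Pairwise (fun a b => pvKey a ≤ pvKey b) →
    (∀ k, pvF k ys = pvF k zs) → ys = zs := by
  intro ys
  induction ys with
  | nil =>
      intro zs _ _ hF
      cases zs with
      | nil => rfl
      | cons b zs' =>
          have := hF (pvKey b)
          simp [pvF, List.filter] at this
  | cons a ys' ih =>
      intro zs hys hzs hF
      cases zs with
      | nil =>
          have := hF (pvKey a)
          simp [pvF, List.filter] at this
      | cons b zs' =>
          have hys1 := List.pairwise_cons.1 hys
          have hzs1 := List.pairwise_cons.1 hzs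
          have hk : pvKey a = pvKey b := by
            by_contra hk
            have ha : a ∈ b :: zs' := pvMem_of_filter _ _ hF a (by simp)
            have hb : b ∈ a :: ys' := pvMem_of_filter _ _ (fun k => (hF k).symm) b (by simp)
            have ha' : a ∈ zs' := by
              rcases ha with _ | h
              · exact absurd rfl hk
              · assumption
            have hb' : b ∈ ys' := by
              rcases hb with _ | h
              · exact absurd rfl (fun e => hk e.symm)
              · assumption
            have h1 : pvKey b ≤ pvKey a := hzs1.1 a ha'
            have h2 : pvKey a ≤ pvKey b := hys1.1 b hb'
            exact hk (le_antisymm h2 h1)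
          have hVa : pvF (pvKey a) (a :: ys') = a :: pvF (pvKey a) ys' := by
            simp [pvF, List.filter_cons]
          have hVb : pvF (pvKey a) (b :: zs') = b :: pvF (pvKey a) zs' := by
            simp [pvF, List.filter_cons, hk.symm]
          have h := hF (pvKey a)
          rw [hVa, hVb] at h
          injection h with hab htail
          rw [hab]
          congr 1
          refine ih zs' hys1.2 hzs1.2 (fun k => ?_)
          by_cases hka : pvKey a = k
          · rw [← hka]; exact htail
          · have h := hF k
            have e1 : pvF k (a :: ys') = pvF k ys' := by
              simp [pvF, List.filter_cons, hka]
            have e2 : pvF k (b :: zs') = pvF k zs' := by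
              simp [pvF, List.filter_cons, hk ▸ hka]
            rw [e1, e2] at h
            exact h

-- one stable insertion-sort pass by key g, analysed generically: it is ordered by g with
-- ties kept in the incoming order T, and it preserves the filter by the full key pvKey

def pvComb {κ μ : Type} [LinearOrder κ] [LinearOrder μ] (g : String → κ) (T : String → μ)
    (a b : String) : Prop :=
  g a < g b ∨ (g a = g b ∧ T a ≤ T b)

theorem pvInsertBy_cons {κ : Type} [LinearOrder κ] (g : String → κ) (x y : String) (ys : List String) :
    PySem.List.insertBy (fun a b => decide (g a < g b)) x (y :: ys)
      = if g x < g y then x :: y :: ys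
        else y :: PySem.List.insertBy (fun a b => decide (g a < g b)) x ys := by
  simp [PySem.List.insertBy]

theorem pvInsertBy_pairwise {κ μ : Type} [LinearOrder κ] [LinearOrder μ]
    (g : String → κ) (T : String → μ) (x : String) :
    ∀ (ys : List String), ys.Pairwise (pvComb g T) → (∀ z ∈ ys, T z ≤ T x) →
      (PySem.List.insertBy (fun a b => decide (g a < g b)) x ys).Pairwise (pvComb g T) := by
  intro ys
  induction ys with
  | nil => intro _ _; simp [PySem.List.insertBy, List.pairwise_singleton]
  | cons y ys ih =>
      intro h hT
      have h1 := List.pairwise_cons.1 h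
      rw [pvInsertBy_cons g]
      by_cases hb : g x < g y
      · rw [if_pos hb]
        refine List.pairwise_cons.2 ⟨?_, h⟩
        intro z hz
        rcases hz with _ | hz
        · exact Or.inl hb
        · have hyz : g y ≤ g z := by
            rcases h1.1 z (by assumption) with h' | h'
            · exact le_of_lt h'
            · exact le_of_eq h'.1
          exact Or.inl (lt_of_lt_of_le hb hyz)
      · rw [if_neg hb]
        refine List.pairwise_cons.2 ⟨?_, ih h1.2 (fun z hz => hT z (by simp [hz]))⟩
        intro z hz
        rcases (PySem.List.mem_insertBy _ x z ys).1 hz with hz | hz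
        · subst hz
          rcases lt_or_eq_of_le (le_of_not_gt hb) with h' | h'
          · exact Or.inl h'
          · exact Or.inr ⟨h', hT y (by simp)⟩
        · exact h1.1 z hz

theorem pvInsertBy_filter {κ : Type} [LinearOrder κ] (g : String → κ)
    (href : ∀ a b : String, pvKey a = pvKey b → g a = g b) (x : String) :
    ∀ (ys : List String), ys.Pairwise (fun a b => g a ≤ g b) → ∀ k,
      pvF k (PySem.List.insertBy (fun a b => decide (g a < g b)) x ys)
        = if pvKey x = k then pvF k ys ++ [x] else pvF k ys := by
  intro ys
  induction ys with
  | nil =>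
      intro _ k
      by_cases hk : pvKey x = k <;> simp [PySem.List.insertBy, pvF, List.filter_cons, hk]
  | cons y ys ih =>
      intro h k
      have h1 := List.pairwise_cons.1 h
      rw [pvInsertBy_cons g]
      by_cases hb : g x < g y
      · rw [if_pos hb]
        by_cases hk : pvKey x = k
        · have hnone : pvF k (y :: ys) = [] := by
            rw [List.eq_nil_iff_forall_not_mem]
            intro z hz
            have hz' : z ∈ y :: ys ∧ pvKey z = k := by
              simpa [pvF, List.mem_filter] using hz
            have hgz : g z = g x := href z x (hz'.2.trans hk.symm)
            have : g y ≤ g z := by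
              rcases hz'.1 with _ | hz1
              · exact le_refl _
              · exact h1.1 z (by assumption)
            rw [hgz] at this
            exact absurd hb (not_lt.2 this)
          rw [hnone, if_pos hk]
          have : pvF k (x :: y :: ys) = x :: pvF k (y :: ys) := by
            simp [pvF, List.filter_cons, hk]
          rw [this, hnone]
          simp
        · rw [if_neg hk]
          simp [pvF, List.filter_cons, hk]
      · rw [if_neg hb]
        have e : pvF k (y :: PySem.List.insertBy (fun a b => decide (g a < g b)) x ys)
            = if pvKey y = k
              then y :: pvF k (PySem.List.insertBy (fun a b => decide (g a < g b)) x ys)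
              else pvF k (PySem.List.insertBy (fun a b => decide (g a < g b)) x ys) := by
          by_cases hy : pvKey y = k <;> simp [pvF, List.filter_cons, hy]
        rw [e, ih h1.2 k]
        by_cases hy : pvKey y = k <;> by_cases hk : pvKey x = k <;>
          simp [pvF, List.filter_cons, hy, hk]

theorem pvFoldl_sort {κ μ : Type} [LinearOrder κ] [LinearOrder μ]
    (g : String → κ) (T : String → μ)
    (href : ∀ a b : String, pvKey a = pvKey b → g a = g b) :
    ∀ (l acc : List String), acc.Pairwise (pvComb g T) →
      (∀ z ∈ acc, ∀ w ∈ l, T z ≤ T w) → l.Pairwise (fun a b => T a ≤ T b) →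
      (l.foldl (fun acc x => PySem.List.insertBy (fun a b => decide (g a < g b)) x acc) acc).Pairwise
          (pvComb g T) ∧
      ∀ k, pvF k (l.foldl (fun acc x => PySem.List.insertBy (fun a b => decide (g a < g b)) x acc) acc)
        = pvF k acc ++ pvF k l := by
  intro l
  induction l with
  | nil => intro acc hacc _ _; exact ⟨hacc, fun k => by simp [pvF]⟩
  | cons x l ih =>
      intro acc hacc hcross hl
      have hl1 := List.pairwise_cons.1 hl
      simp only [List.foldl_cons]
      have hacc' : (PySem.List.insertBy (fun a b => decide (g a < g b)) x acc).Pairwise (pvComb g T) :=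
        pvInsertBy_pairwise g T x acc hacc (fun z hz => hcross z hz x (by simp))
      have hcross' : ∀ z ∈ PySem.List.insertBy (fun a b => decide (g a < g b)) x acc,
          ∀ w ∈ l, T z ≤ T w := by
        intro z hz w hw
        rcases (PySem.List.mem_insertBy _ x z acc).1 hz with hz | hz
        · subst hz; exact hl1.1 w hw
        · exact hcross z hz w (by simp [hw])
      obtain ⟨hp, hf⟩ := ih _ hacc' hcross' hl1.2
      refine ⟨hp, fun k => ?_⟩
      rw [hf k]
      have hgle : acc.Pairwise (fun a b => g a ≤ g b) := by
        refine hacc.imp ?_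
        intro a b hab
        rcases hab with h' | h'
        · exact le_of_lt h'
        · exact le_of_eq h'.1
      rw [pvInsertBy_filter g href x acc hgle k]
      by_cases hk : pvKey x = k <;>
        simp [pvF, List.filter_cons, hk, List.append_assoc]

theorem pvSortedG {κ μ : Type} [LinearOrder κ] [LinearOrder μ]
    (g : String → κ) (T : String → μ)
    (href : ∀ a b : String, pvKey a = pvKey b → g a = g b)
    (l : List String) (hl : l.Pairwise (fun a b => T a ≤ T b)) :
    (PySem.List.sorted l g).Pairwise (pvComb g T) ∧
    ∀ k, pvF k (PySem.List.sorted l g) = pvF k l := by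
  rw [PySem.List.sorted_eq_foldl_insertBy]
  have h := pvFoldl_sort g T href l [] List.Pairwise.nil (by simp) hl
  exact ⟨h.1, fun k => by rw [h.2 k]; simp [pvF]⟩

theorem pvKey_eq_iff (a b : String) :
    pvKey a = pvKey b ↔
      pvVowels a = pvVowels b ∧ PySem.Str.len a = PySem.Str.len b ∧
      PySem.Str.lower a = PySem.Str.lower b := by
  unfold pvKey
  constructor
  · intro h
    have h1 := congrArg ofLex h
    simp only [ofLex_toLex, Prod.mk.injEq] at h1
    have h2 := congrArg ofLex h1.2
    simp only [ofLex_toLex, Prod.mk.injEq] at h2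
    exact ⟨h1.1, h2.1, h2.2⟩
  · rintro ⟨h1, h2, h3⟩
    rw [h1, h2, h3]

theorem pvAlt_props (arr : List String) :
    (sort_strings_alt arr).Pairwise (fun a b => pvKey a ≤ pvKey b) ∧
    ∀ k, pvF k (sort_strings_alt arr) = pvF k arr := by
  unfold sort_strings_alt
  -- pass 1: by s.lower(); the incoming order is irrelevant (T constant)
  have htriv : arr.Pairwise (fun (_ _ : String) => (0 : Int) ≤ 0) := by
    induction arr with
    | nil => exact List.Pairwise.nil
    | cons a t ih => exact List.Pairwise.cons (fun _ _ => le_refl 0) ih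
  obtain ⟨hp1, hf1⟩ := pvSortedG (fun s => PySem.Str.lower s) (fun _ => (0 : Int))
    (fun a b h => ((pvKey_eq_iff a b).1 h).2.2) arr htriv
  -- pass 2: by len(s), stable on the lower()-ordered list
  have hp1' : (PySem.List.sorted arr (fun s => PySem.Str.lower s)).Pairwise
      (fun a b => PySem.Str.lower a ≤ PySem.Str.lower b) := by
    refine hp1.imp ?_
    intro a b hab
    rcases hab with h' | h'
    · exact le_of_lt h'
    · exact le_of_eq h'.1
  obtain ⟨hp2, hf2⟩ := pvSortedG (fun s => PySem.Str.len s) (fun s => PySem.Str.lower s)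
    (fun a b h => ((pvKey_eq_iff a b).1 h).2.1) _ hp1'
  -- pass 3: by the vowel count, stable on the (len, lower)-ordered list
  have hp2' : (PySem.List.sorted (PySem.List.sorted arr (fun s => PySem.Str.lower s))
      (fun s => PySem.Str.len s)).Pairwise
      (fun a b => (toLex (PySem.Str.len a, PySem.Str.lower a) : Lex (Int × String))
        ≤ toLex (PySem.Str.len b, PySem.Str.lower b)) := by
    refine hp2.imp ?_
    intro a b hab
    rw [Prod.Lex.toLex_le_toLex]
    exact hab
  obtain ⟨hp3, hf3⟩ := pvSortedG pvVowels
    (fun s => (toLex (PySem.Str.len s, PySem.Str.lower s) : Lex (Int × String)))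
    (fun a b h => ((pvKey_eq_iff a b).1 h).1) _ hp2'
  refine ⟨?_, fun k => by rw [hf3 k, hf2 k, hf1 k]⟩
  refine hp3.imp ?_
  intro a b hab
  unfold pvKey
  rw [Prod.Lex.toLex_le_toLex]
  exact hab

-- the outer loop invariant of A's bubble sort
theorem pvOuterStep (a : List String) (i : Int) :
    (PySem.List.pyRange 0 (PySem.List.len a - i - 1)).foldl pvInnerStep a
      = pvGo (PySem.List.len a - i - 1).toNat a := by
  have hL : PySem.List.len a = ((a.length : Nat) : Int) := rfl
  rcases hm : (PySem.List.len a - i - 1).toNat with _ | m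
  · -- bound ≤ 0: empty range, fuel 0
    have hle : PySem.List.len a - i - 1 ≤ 0 := by
      rw [hL] at hm ⊢; omega
    have hr : PySem.List.pyRange 0 (PySem.List.len a - i - 1) = [] := by
      simp [PySem.List.pyRange]
      omega
    rw [hr]
    cases a <;> rfl
  · have hcast : PySem.List.len a - i - 1 = ((m + 1 : Nat) : Int) := by
      rw [hL] at hm ⊢; omega
    rw [hcast]
    have := pvBridge (m + 1) 0 a
    simpa using this

theorem pvOuterInv (arr : List String) :
    ∀ (i : Nat), i ≤ arr.length →
      ∃ p s : List String,
        (PySem.List.pyRange 0 (i : Int)).foldl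
            (fun a j => (PySem.List.pyRange 0 (PySem.List.len a - j - 1)).foldl pvInnerStep a) arr
          = p ++ s ∧
        p.length = arr.length - i ∧ p.length + s.length = arr.length ∧
        s.Pairwise (fun a b => pvKey a ≤ pvKey b) ∧
        (∀ x ∈ p, ∀ y ∈ s, pvKey x ≤ pvKey y) ∧
        (∀ k, pvF k (p ++ s) = pvF k arr) := by
  intro i
  induction i with
  | zero =>
      intro _
      refine ⟨arr, [], ?_, by simp, by simp, List.Pairwise.nil, by simp, by simp⟩
      have : PySem.List.pyRange 0 ((0 : Nat) : Int) = [] := by simp [PySem.List.pyRange]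
      rw [this]; simp
  | succ i ih =>
      intro hi
      obtain ⟨p, s, heq, hlp, hlen, hps, hcross, hstab⟩ := ih (by omega)
      have hrange : PySem.List.pyRange 0 ((i + 1 : Nat) : Int)
          = PySem.List.pyRange 0 (i : Int) ++ PySem.List.pyRange (i : Int) ((i + 1 : Nat) : Int) := by
        exact PySem.List.pyRange_one_append 0 (i : Int) ((i + 1 : Nat) : Int)
          (by positivity) (by push_cast; omega)
      have hsing : PySem.List.pyRange (i : Int) ((i + 1 : Nat) : Int) = [(i : Int)] := by
        rw [PySem.List.pyRange_one_cons (by push_cast; omega)]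
        have : PySem.List.pyRange ((i : Int) + 1) ((i + 1 : Nat) : Int) = [] := by
          simp [PySem.List.pyRange]
        rw [this]
      rw [hrange, hsing, List.foldl_append, heq]
      simp only [List.foldl_cons, List.foldl_nil]
      -- the (i+1)-st pass
      have hpne : p ≠ [] := by
        intro h; rw [h] at hlp; simp at hlp; omega
      obtain ⟨x, t, hp⟩ := List.exists_cons_of_ne_nil hpne
      have hfuel : (PySem.List.len (p ++ s) - (i : Int) - 1).toNat = p.length - 1 := by
        have hL : PySem.List.len (p ++ s) = ((p.length + s.length : Nat) : Int) := by
          simp [PySem.List.len]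
        rw [hL]; omega
      rw [pvOuterStep, hfuel]
      have hgo : pvGo (p.length - 1) (p ++ s) = pvGo (p.length - 1) p ++ s := by
        apply pvGo_append
        rw [hp]; simp
      rw [hgo]
      obtain ⟨q, b, hpass, hmax, hpstab⟩ := pvPass_spec t x
      rw [← hp] at hpass hpstab
      rw [hpass]
      have hmemqb : ∀ z ∈ q ++ [b], z ∈ p := pvMem_of_filter _ _ hpstab
      have hbp : b ∈ p := hmemqb b (by simp)
      have hqlen : q.length + 1 = p.length := by
        have := pvGo_length (p.length - 1) p
        rw [hpass] at this
        simp at this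
        omega
      refine ⟨q, b :: s, by simp, by omega, by simp; omega, ?_, ?_, ?_⟩
      · refine List.pairwise_cons.2 ⟨?_, hps⟩
        intro y hy
        exact hcross b hbp y hy
      · intro z hz y hy
        rcases hy with _ | hy
        · exact hmax z hz
        · exact hcross z (hmemqb z (by simp [hz])) y (by assumption)
      · intro k
        have e1 : q ++ b :: s = (q ++ [b]) ++ s := by simp
        rw [e1, pvF_append k (q ++ [b]) s, hpstab k, ← pvF_append k p s]
        exact hstab k

-- ===== VERDICT (by name: the statement is the Claim_ definition above) =====
theorem sort_strings_spec : Claim_equal_sort_strings := by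
  intro arr _
  unfold Spec_sort_strings sort_strings
  obtain ⟨p, s, heq, hlp, hlen, hps, hcross, hstab⟩ := pvOuterInv arr arr.length (le_refl _)
  have hp : p = [] := by
    rw [List.eq_nil_iff_length_eq_zero]
    omega
  rw [hp] at heq hstab
  simp only [List.nil_append] at heq hstab
  have hbody : PySem.List.len arr = ((arr.length : Nat) : Int) := rfl
  rw [hbody, heq]
  apply pvUniq s (sort_strings_alt arr) hps (pvAlt_props arr).1
  intro k
  rw [hstab k, (pvAlt_props arr).2 k]
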